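-- pv_equiv track=rewrite | github.com/bfeist/slater-film-catalog | scripts/files_audit/disk_vs_db.py | build_folder_index
-- ===== SOURCE A (Python) =====
-- from collections import defaultdict
--
-- def build_folder_index(db_sizes: dict[str, int]) -> dict[str, tuple[int, int]]:
--     """
--     Pre-aggregate DB sizes by top-level folder prefix for fast lookups.
--     Returns {normalised_top_folder: (file_count, total_bytes)}
--     """
--     agg: dict[str, list] = defaultdict(lambda: [0, 0])
--     for norm_path, sz in db_sizes.items():
--         parts = norm_path.split("/")   # e.g. ["o:", "master 1", "foo", "bar.mov"]
--         top = (parts[0] + "/" + parts[1]) if len(parts) >= 2 else parts[0]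
--         agg[top][0] += 1
--         agg[top][1] += sz
--     return {k: (v[0], v[1]) for k, v in agg.items()}
-- ===== SOURCE B (Python) =====
-- def build_folder_index(db_sizes: dict[str, int]) -> dict[str, tuple[int, int]]:
--     """
--     Pre-aggregate DB sizes by top-level folder prefix for fast lookups.
--     Returns {normalised_top_folder: (file_count, total_bytes)}
--     """
--     def top(norm_path: str) -> str:
--         parts = norm_path.split("/")
--         return (parts[0] + "/" + parts[1]) if len(parts) >= 2 else parts[0]
--
--     def merge(left: dict, right: dict) -> dict:
--         out = dict(left)
--         for k, (c, s) in right.items():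
--             c0, s0 = out.get(k, (0, 0))
--             out[k] = (c0 + c, s0 + s)
--         return out
--
--     def rec(items: list) -> dict:
--         if len(items) <= 1:
--             if not items:
--                 return {}
--             p, sz = items[0]
--             return {top(p): (1, sz)}
--         mid = len(items) // 2
--         return merge(rec(items[:mid]), rec(items[mid:]))
--
--     return rec(list(db_sizes.items()))
-- ===== Notes on version B (the rewrite author's own statement) =====
-- stated objective: alternative
-- what changed: A makes one left-to-right pass over the items accumulating running [count, bytes] tallies in a defaultdict; B is divide-and-conquer: it recursively builds a folder index for each half of the item list and merges the two partial indexes (adding counts and byte totals per key, left keys first), so no running accumulator is ever threaded through the input.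
import Mathlib
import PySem

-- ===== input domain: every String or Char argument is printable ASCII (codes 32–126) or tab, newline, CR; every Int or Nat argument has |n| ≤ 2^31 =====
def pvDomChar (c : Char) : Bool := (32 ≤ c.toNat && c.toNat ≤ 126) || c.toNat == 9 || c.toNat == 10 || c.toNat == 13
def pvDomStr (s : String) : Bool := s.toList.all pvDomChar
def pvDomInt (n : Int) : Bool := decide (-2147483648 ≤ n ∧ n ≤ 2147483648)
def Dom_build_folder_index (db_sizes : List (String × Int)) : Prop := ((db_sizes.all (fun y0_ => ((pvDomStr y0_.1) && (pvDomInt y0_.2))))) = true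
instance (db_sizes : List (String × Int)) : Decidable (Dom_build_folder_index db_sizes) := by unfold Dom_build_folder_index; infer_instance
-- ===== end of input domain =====

-- B builds the index by divide-and-conquer — index each half of the item list
-- recursively, then merge the partial indexes per key — instead of A's single
-- accumulating pass; alternative decomposition, not claimed faster.


-- ===== PORT A =====
-- shared helper: norm_path.split("/"); parts[0]+"/"+parts[1] if len(parts)>=2 else parts[0]
-- (both Pythons compute this same expression)
def pvTopFolder (norm_path : String) : String :=
  -- sep "/" is a nonempty literal, so split? is always `some` (none only for sep = "")
  let parts := (PySem.Str.split? norm_path "/").getD []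
  if parts.length ≥ 2 then (PySem.List.pyGetD parts 0 "") ++ "/" ++ (PySem.List.pyGetD parts 1 "")
  else PySem.List.pyGetD parts 0 ""

-- A: defaultdict(lambda: [0,0]); the two in-place '+=' on agg[top] are ported as
-- one insert of the updated pair (same dict state after the iteration).
def build_folder_index (db_sizes : List (String × Int)) : List (String × Int × Int) :=
  let agg : PySem.Dict String (Int × Int) :=
    db_sizes.foldl (fun agg pr =>
      agg.insert (pvTopFolder pr.1)
        ((agg.getD (pvTopFolder pr.1) (0, 0)).1 + 1,
         (agg.getD (pvTopFolder pr.1) (0, 0)).2 + pr.2)) PySem.Dict.empty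
  agg.items.map (fun kv => (kv.1, (kv.2.1, kv.2.2)))

-- ===== PORT B =====
-- B's merge(left, right): out = dict(left); for k,(c,s) in right.items():
--   c0,s0 = out.get(k,(0,0)); out[k] = (c0+c, s0+s)
def pvMerge (left right : PySem.Dict String (Int × Int)) : PySem.Dict String (Int × Int) :=
  right.items.foldl (fun out kv =>
    out.insert kv.1
      ((out.getD kv.1 (0, 0)).1 + kv.2.1,
       (out.getD kv.1 (0, 0)).2 + kv.2.2)) left

-- B's rec(items): singleton/empty base, otherwise split at mid = len // 2 and merge.
-- items[:mid] / items[mid:] with 0 ≤ mid ≤ len are exactly take/drop.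
def pvRec (l : List (String × Int)) : PySem.Dict String (Int × Int) :=
  if l.length ≤ 1 then
    match l with
    | [] => PySem.Dict.empty
    | pr :: _ => PySem.Dict.empty.insert (pvTopFolder pr.1) (1, pr.2)
  else
    pvMerge (pvRec (l.take (l.length / 2))) (pvRec (l.drop (l.length / 2)))
termination_by l.length
decreasing_by
  · simp only [List.length_take]; omega
  · simp only [List.length_drop]; omega

def build_folder_index_alt (db_sizes : List (String × Int)) : List (String × Int × Int) :=
  (pvRec db_sizes).items

-- ===== PRECONDITION & SPEC =====
def Spec_build_folder_index (db_sizes : List (String × Int)) (out : List (String × Int × Int)) : Prop := out = build_folder_index_alt db_sizes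
instance (db_sizes : List (String × Int)) (out : List (String × Int × Int)) : Decidable (Spec_build_folder_index db_sizes out) := by unfold Spec_build_folder_index; infer_instance

-- ===== CLAIM (what is proved, stated in full; the proofs are below) =====
def Claim_equal_build_folder_index : Prop := ∀ (db_sizes : List (String × Int)), Dom_build_folder_index db_sizes → Spec_build_folder_index db_sizes (build_folder_index db_sizes)

-- ===== LEMMAS AND PROOFS =====

-- value of A's accumulator dict at key k, after folding l from any start d
theorem pvFoldAgg_getD (l : List (String × Int)) (d : PySem.Dict String (Int × Int)) (k : String) :
    (l.foldl (fun agg pr =>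
      agg.insert (pvTopFolder pr.1)
        ((agg.getD (pvTopFolder pr.1) (0, 0)).1 + 1,
         (agg.getD (pvTopFolder pr.1) (0, 0)).2 + pr.2)) d).getD k (0, 0)
    = ((d.getD k (0, 0)).1 + ((l.filter (fun pr => pvTopFolder pr.1 == k)).length : Int),
       (d.getD k (0, 0)).2 + ((l.filter (fun pr => pvTopFolder pr.1 == k)).map (fun pr => pr.2)).sum) := by
  induction l generalizing d with
  | nil => simp
  | cons p t ih =>
    simp only [List.foldl_cons, List.filter_cons]
    rw [ih]
    by_cases h : pvTopFolder p.1 = k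
    · simp [h, Prod.ext_iff]
      constructor <;> ring
    · simp [h, PySem.Dict.getD_insert, Ne.symm h]

-- value at key k after B's merge loop over an item list r, from any start d
theorem pvFoldAdd_getD (r : List (String × (Int × Int))) (d : PySem.Dict String (Int × Int)) (k : String) :
    (r.foldl (fun out kv =>
      out.insert kv.1
        ((out.getD kv.1 (0, 0)).1 + kv.2.1,
         (out.getD kv.1 (0, 0)).2 + kv.2.2)) d).getD k (0, 0)
    = ((d.getD k (0, 0)).1 + ((r.filter (fun kv => kv.1 == k)).map (fun kv => kv.2.1)).sum,
       (d.getD k (0, 0)).2 + ((r.filter (fun kv => kv.1 == k)).map (fun kv => kv.2.2)).sum) := by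
  induction r generalizing d with
  | nil => simp
  | cons p t ih =>
    simp only [List.foldl_cons, List.filter_cons]
    rw [ih]
    by_cases h : p.1 = k
    · simp [h, Prod.ext_iff]
      constructor <;> ring
    · simp [h, PySem.Dict.getD_insert, Ne.symm h]

-- on a duplicate-free list, filtering for one key keeps at most that one element
theorem pvFilterBeqNodup (l : List String) (h : l.Nodup) (k : String) :
    l.filter (fun x => x == k) = if k ∈ l then [k] else [] := by
  induction l with
  | nil => simp
  | cons a t ih =>
    rcases List.nodup_cons.mp h with ⟨ha, ht⟩
    by_cases hak : a = k
    · subst hak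
      simp [ha, ih ht]
    · simp [hak, ih ht, Ne.symm hak]

-- set-update by a deduplicated list = set-update by the list itself
theorem pvUpdateOfList (s : List String) (xs : List String) :
    PySem.Set.update s (PySem.Set.ofList xs) = PySem.Set.update s xs := by
  have hid : PySem.Set.ofList (PySem.Set.ofList xs) = PySem.Set.ofList xs := by
    rw [← PySem.Set.update_nil_left,
        PySem.Set.update_eq_append_of_disjoint _ _ (PySem.Set.nodup_ofList xs) (by simp)]
    simp
  rw [PySem.Set.update_eq_append_filter, PySem.Set.update_eq_append_filter, hid]

-- merging a half-index built from r into d = running A's accumulation of r over d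
theorem pvMerge_agg (r : List (String × Int)) (d : PySem.Dict String (Int × Int))
    (hd : d.keys.Nodup) :
    pvMerge d (r.foldl (fun agg pr =>
      agg.insert (pvTopFolder pr.1)
        ((agg.getD (pvTopFolder pr.1) (0, 0)).1 + 1,
         (agg.getD (pvTopFolder pr.1) (0, 0)).2 + pr.2)) PySem.Dict.empty)
    = r.foldl (fun agg pr =>
      agg.insert (pvTopFolder pr.1)
        ((agg.getD (pvTopFolder pr.1) (0, 0)).1 + 1,
         (agg.getD (pvTopFolder pr.1) (0, 0)).2 + pr.2)) d := by
  set e : PySem.Dict String (Int × Int) := r.foldl (fun agg pr =>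
      agg.insert (pvTopFolder pr.1)
        ((agg.getD (pvTopFolder pr.1) (0, 0)).1 + 1,
         (agg.getD (pvTopFolder pr.1) (0, 0)).2 + pr.2)) PySem.Dict.empty with he
  have hekeys : e.keys = PySem.Set.ofList (r.map (fun pr => pvTopFolder pr.1)) := by
    rw [he, PySem.Dict.keys_foldl_insert_key]
    simp [PySem.Set.update_nil_left]
  have hen : e.keys.Nodup := by rw [hekeys]; exact PySem.Set.nodup_ofList _
  have hln : (pvMerge d e).keys.Nodup := by
    unfold pvMerge
    exact PySem.Dict.nodup_keys_foldl_insert_key _ _ _ _ hd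
  have hrn : (r.foldl (fun agg pr =>
      agg.insert (pvTopFolder pr.1)
        ((agg.getD (pvTopFolder pr.1) (0, 0)).1 + 1,
         (agg.getD (pvTopFolder pr.1) (0, 0)).2 + pr.2)) d).keys.Nodup :=
    PySem.Dict.nodup_keys_foldl_insert_key _ _ _ _ hd
  apply PySem.Dict.ext
  rw [PySem.Dict.items_eq_map_keys _ hln (0, 0), PySem.Dict.items_eq_map_keys _ hrn (0, 0)]
  have hkeys : (pvMerge d e).keys
      = (r.foldl (fun agg pr =>
          agg.insert (pvTopFolder pr.1)
            ((agg.getD (pvTopFolder pr.1) (0, 0)).1 + 1,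
             (agg.getD (pvTopFolder pr.1) (0, 0)).2 + pr.2)) d).keys := by
    unfold pvMerge
    rw [PySem.Dict.keys_foldl_insert_key, PySem.Dict.keys_foldl_insert_key]
    have : e.items.map Prod.fst = e.keys := by simp [PySem.Dict.keys]
    rw [this, hekeys, pvUpdateOfList]
  rw [hkeys]
  apply List.map_congr_left
  intro k _
  have hgetD : (pvMerge d e).getD k (0, 0)
      = (r.foldl (fun agg pr =>
          agg.insert (pvTopFolder pr.1)
            ((agg.getD (pvTopFolder pr.1) (0, 0)).1 + 1,
             (agg.getD (pvTopFolder pr.1) (0, 0)).2 + pr.2)) d).getD k (0, 0) := by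
    unfold pvMerge
    rw [pvFoldAdd_getD, pvFoldAgg_getD]
    have hitems : e.items.filter (fun kv => kv.1 == k)
        = if k ∈ e.keys then [(k, e.getD k (0, 0))] else [] := by
      rw [PySem.Dict.items_eq_map_keys _ hen (0, 0), List.filter_map]
      have : ((fun kv : String × Int × Int => kv.1 == k) ∘ (fun k' => (k', e.getD k' (0, 0))))
          = fun x => x == k := by funext x; simp
      rw [this, pvFilterBeqNodup _ hen k]
      by_cases hk : k ∈ e.keys <;> simp [hk]
    have heval : e.getD k (0, 0)
        = (((r.filter (fun pr => pvTopFolder pr.1 == k)).length : Int),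
           ((r.filter (fun pr => pvTopFolder pr.1 == k)).map (fun pr => pr.2)).sum) := by
      rw [he, pvFoldAgg_getD]; simp
    by_cases hk : k ∈ e.keys
    · rw [hitems]; simp only [hk, if_true]
      simp [heval]
    · rw [hitems]; simp only [hk, if_false]
      have hz : e.getD k (0, 0) = (0, 0) := by
        apply PySem.Dict.getD_of_not_contains
        rw [PySem.Dict.contains_eq_decide_mem_keys]
        simp [hk]
      rw [hz, Prod.ext_iff] at heval
      obtain ⟨h1, h2⟩ := heval
      simp only at h1 h2
      rw [← h1, ← h2]
      simp
  rw [hgetD]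

-- B's recursion computes exactly A's accumulator dict
theorem pvRec_eq (l : List (String × Int)) :
    pvRec l = l.foldl (fun agg pr =>
      agg.insert (pvTopFolder pr.1)
        ((agg.getD (pvTopFolder pr.1) (0, 0)).1 + 1,
         (agg.getD (pvTopFolder pr.1) (0, 0)).2 + pr.2)) PySem.Dict.empty := by
  induction l using pvRec.induct with
  | case1 _ =>
    unfold pvRec
    simp
  | case2 pr tail hle =>
    have ht : tail = [] := by
      cases tail with
      | nil => rfl
      | cons a t => simp at hle
    subst ht
    unfold pvRec
    simp
  | case3 x hgt ih1 ih2 =>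
    unfold pvRec
    rw [if_neg hgt, ih1, ih2,
        pvMerge_agg _ _ (PySem.Dict.nodup_keys_foldl_insert_key _ _ _ _ (by simp)),
        ← List.foldl_append, List.take_append_drop]

theorem build_folder_index_spec' (db_sizes : List (String × Int)) :
    build_folder_index db_sizes = build_folder_index_alt db_sizes := by
  simp only [build_folder_index, build_folder_index_alt, pvRec_eq]
  simp

-- ===== VERDICT (by name: the statement is the Claim_ definition above) =====
theorem build_folder_index_spec : Claim_equal_build_folder_index := by
  intro db_sizes _
  unfold Spec_build_folder_index
  exact build_folder_index_spec' db_sizes
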